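-- pv_equiv track=rewrite | github.com/midnightnnn/llm_invest | arena/memory/tuning.py | _sample_summary
-- ===== SOURCE A (Python) =====
-- from typing import Any
--
-- def _safe_int(value: Any) -> int:
--     try:
--         return max(0, int(value or 0))
--     except (TypeError, ValueError):
--         return 0
--
-- def _sample_summary(rows: list[dict[str, Any]]) -> dict[str, int]:
--     accessed_rows = [row for row in rows if _safe_int(row.get("access_count")) > 0]
--     return {
--         "total_rows": len(rows),
--         "unique_memories": len(accessed_rows),
--         "access_events": sum(_safe_int(row.get("access_count")) for row in rows),
--         "prompt_uses": sum(_safe_int(row.get("prompt_use_count")) for row in rows),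
--         "short_access_events": sum(_safe_int(row.get("short_access_count")) for row in rows),
--         "short_prompt_uses": sum(_safe_int(row.get("short_prompt_use_count")) for row in rows),
--     }
-- ===== SOURCE B (Python) =====
-- from typing import Any
--
-- def _safe_int(value: Any) -> int:
--     try:
--         return max(0, int(value or 0))
--     except (TypeError, ValueError):
--         return 0
--
-- def _row_summary(row: dict[str, Any]) -> tuple:
--     ac = _safe_int(row.get("access_count"))
--     return (1,
--             1 if ac > 0 else 0,
--             ac,
--             _safe_int(row.get("prompt_use_count")),
--             _safe_int(row.get("short_access_count")),
--             _safe_int(row.get("short_prompt_use_count")))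
--
-- def _summarize(rs: list) -> tuple:
--     # divide-and-conquer merge of partial summaries (the combine is pointwise +)
--     if len(rs) == 0:
--         return (0, 0, 0, 0, 0, 0)
--     if len(rs) == 1:
--         return _row_summary(rs[0])
--     mid = len(rs) // 2
--     left = _summarize(rs[:mid])
--     right = _summarize(rs[mid:])
--     return tuple(x + y for x, y in zip(left, right))
--
-- def _sample_summary(rows: list[dict[str, Any]]) -> dict[str, int]:
--     n, u, a, p, sa, sp = _summarize(rows)
--     return {
--         "total_rows": n,
--         "unique_memories": u,
--         "access_events": a,
--         "prompt_uses": p,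
--         "short_access_events": sa,
--         "short_prompt_uses": sp,
--     }
-- ===== Notes on version B (the rewrite author's own statement) =====
-- stated objective: alternative
-- what changed: Replaces A's filter plus five independent full passes with a divide-and-conquer aggregation: partial six-component summaries of the two halves are computed recursively and merged by pointwise addition (correct because every aggregate is an associative sum over rows).
import Mathlib
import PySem

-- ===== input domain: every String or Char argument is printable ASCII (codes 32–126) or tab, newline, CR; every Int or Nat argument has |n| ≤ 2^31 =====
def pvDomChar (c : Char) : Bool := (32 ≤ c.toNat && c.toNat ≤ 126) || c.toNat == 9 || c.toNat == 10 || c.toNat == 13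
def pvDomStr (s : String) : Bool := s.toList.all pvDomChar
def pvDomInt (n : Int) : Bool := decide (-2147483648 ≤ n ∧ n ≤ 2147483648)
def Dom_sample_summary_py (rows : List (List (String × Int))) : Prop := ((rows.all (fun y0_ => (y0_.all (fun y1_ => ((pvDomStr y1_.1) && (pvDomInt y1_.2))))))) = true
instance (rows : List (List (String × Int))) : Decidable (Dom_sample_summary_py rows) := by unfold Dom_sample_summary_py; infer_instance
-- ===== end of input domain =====

-- B replaces A's filter + five independent sum passes by a divide-and-conquer merge of
-- partial six-component summaries (objective: alternative; same values).

-- shared helpers: row.get(key) on an insertion-order dict, and _safe_int (max(0, int(v or 0)))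
def pvGet (row : List (String × Int)) (k : String) : Option Int :=
  (PySem.Dict.mk row).get? k

def safeInt (v : Option Int) : Int := max 0 (v.getD 0)

-- ===== PORT A =====
def sample_summary_py (rows : List (List (String × Int))) : List (String × Int) :=
  let accessed_rows := rows.filter (fun row => decide (0 < safeInt (pvGet row "access_count")))
  [("total_rows", (rows.length : Int)),
   ("unique_memories", (accessed_rows.length : Int)),
   ("access_events", (rows.map (fun row => safeInt (pvGet row "access_count"))).sum),
   ("prompt_uses", (rows.map (fun row => safeInt (pvGet row "prompt_use_count"))).sum),
   ("short_access_events", (rows.map (fun row => safeInt (pvGet row "short_access_count"))).sum),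
   ("short_prompt_uses", (rows.map (fun row => safeInt (pvGet row "short_prompt_use_count"))).sum)]

-- ===== PORT B =====
-- _row_summary of Source B
def rowSummary (row : List (String × Int)) : Int × Int × Int × Int × Int × Int :=
  let ac := safeInt (pvGet row "access_count")
  (1, if 0 < ac then 1 else 0, ac,
   safeInt (pvGet row "prompt_use_count"),
   safeInt (pvGet row "short_access_count"),
   safeInt (pvGet row "short_prompt_use_count"))

-- the pointwise-addition combine (tuple(x+y for x,y in zip(left, right)))
def addT (x y : Int × Int × Int × Int × Int × Int) : Int × Int × Int × Int × Int × Int :=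
  (x.1 + y.1, x.2.1 + y.2.1, x.2.2.1 + y.2.2.1, x.2.2.2.1 + y.2.2.2.1,
   x.2.2.2.2.1 + y.2.2.2.2.1, x.2.2.2.2.2 + y.2.2.2.2.2)

-- _summarize of Source B: divide-and-conquer over the list of rows
def summarize (rs : List (List (String × Int))) : Int × Int × Int × Int × Int × Int :=
  if _h0 : rs.length = 0 then (0, 0, 0, 0, 0, 0)
  else if _h1 : rs.length = 1 then rowSummary (rs.headI)
  else
    let mid := rs.length / 2
    addT (summarize (rs.take mid)) (summarize (rs.drop mid))
termination_by rs.length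
decreasing_by
  · simp only [List.length_take]; omega
  · simp only [List.length_drop]; omega

def sample_summary_py_alt (rows : List (List (String × Int))) : List (String × Int) :=
  let s := summarize rows
  [("total_rows", s.1), ("unique_memories", s.2.1), ("access_events", s.2.2.1),
   ("prompt_uses", s.2.2.2.1), ("short_access_events", s.2.2.2.2.1), ("short_prompt_uses", s.2.2.2.2.2)]

-- ===== PRECONDITION & SPEC =====
def Spec_sample_summary_py (rows : List (List (String × Int))) (out : List (String × Int)) : Prop := out = sample_summary_py_alt rows
instance (rows : List (List (String × Int))) (out : List (String × Int)) : Decidable (Spec_sample_summary_py rows out) := by unfold Spec_sample_summary_py; infer_instance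

-- ===== CLAIM (what is proved, stated in full; the proofs are below) =====
def Claim_equal_sample_summary_py : Prop := ∀ (rows : List (List (String × Int))), Dom_sample_summary_py rows → Spec_sample_summary_py rows (sample_summary_py rows)

-- ===== LEMMAS AND PROOFS =====

-- the six aggregates A computes, as one tuple
def agg (rs : List (List (String × Int))) : Int × Int × Int × Int × Int × Int :=
  ((rs.length : Int),
   ((rs.filter (fun row => decide (0 < safeInt (pvGet row "access_count")))).length : Int),
   (rs.map (fun row => safeInt (pvGet row "access_count"))).sum,
   (rs.map (fun row => safeInt (pvGet row "prompt_use_count"))).sum,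
   (rs.map (fun row => safeInt (pvGet row "short_access_count"))).sum,
   (rs.map (fun row => safeInt (pvGet row "short_prompt_use_count"))).sum)

theorem agg_append (xs ys : List (List (String × Int))) :
    agg (xs ++ ys) = addT (agg xs) (agg ys) := by
  simp [agg, addT, List.filter_append, List.length_append]

theorem agg_singleton (row : List (String × Int)) : agg [row] = rowSummary row := by
  by_cases h : 0 < safeInt (pvGet row "access_count") <;>
    simp [agg, rowSummary, h]

theorem summarize_eq_agg (rs : List (List (String × Int))) : summarize rs = agg rs := by
  induction rs using summarize.induct with
  | case1 rs h0 =>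
      rw [List.length_eq_zero_iff] at h0
      subst h0; simp [summarize, agg]
  | case2 rs h0 h1 =>
      rw [List.length_eq_one_iff] at h1
      obtain ⟨row, rfl⟩ := h1
      rw [summarize]
      simp [agg_singleton, List.headI]
  | case3 rs h0 h1 mid ih1 ih2 =>
      rw [summarize]
      simp only [dif_neg h0, dif_neg h1]
      rw [ih1, ih2, ← agg_append, List.take_append_drop]

-- ===== VERDICT (by name: the statement is the Claim_ definition above) =====
theorem sample_summary_py_spec : Claim_equal_sample_summary_py := by
  intro rows _
  show sample_summary_py rows = sample_summary_py_alt rows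
  simp [sample_summary_py, sample_summary_py_alt, summarize_eq_agg, agg]
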